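-- pv_equiv track=rewrite | github.com/gerow/cs499-security-systems-ctf01 | encrack_analysis.py | detect_odd_space
-- ===== SOURCE A (Python) =====
-- def detect_odd_space(messages):
--   """
--   Return a list of indicies for each
--   message if we detect odd spaces.  That
--   includes spaces at the beginning or end
--   of the message or multiple spaces next to
--   each other. In the case of multiple spaces
--   next to each other we list the index of the
--   first instance unless we have three spaces
--   in which case we list the first two and so on
--   """
--   problems = []
--   for i, message in enumerate(messages):
--     # Create a new entry for this message
--     problems.append([])
--     # Ignore message if empty
--     if not message:
--       continue
--     if message[0] == " ":
--       problems[i].append(0)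
--     for j, c in enumerate(message):
--       try:
--         if c == " " and message[j + 1] == " ":
--           problems[i].append(j)
--       except IndexError:
--         # Just ignore it, we're cool
--         pass
--     if message[-1] == " ":
--       problems[i].append(len(message) - 1)
--   # Return an empty list if it is nothing but
--   # empty list (so this can be used with an if
--   # statement)
--
--   for message_problem in problems:
--     if message_problem:
--       return problems
--   return []
-- ===== SOURCE B (Python) =====
-- def detect_odd_space(messages):
--   # Run-length decomposition: scan each maximal run of equal chars once;
--   # a space-run of length L starting at pos contributes pos..pos+L-2.
--   problems = []
--   for message in messages:
--     idx = []
--     if message: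
--       if message[0] == " ":
--         idx.append(0)
--       pos = 0
--       n = len(message)
--       while pos < n:
--         end = pos + 1
--         while end < n and message[end] == message[pos]:
--           end += 1
--         if message[pos] == " " and end - pos >= 2:
--           idx.extend(range(pos, end - 1))
--         pos = end
--       if message[-1] == " ":
--         idx.append(n - 1)
--     problems.append(idx)
--   return problems if any(problems) else []
-- ===== Notes on version B (the rewrite author's own statement) =====
-- stated objective: alternative
-- what changed: Replaced A's pairwise scan with try/except lookahead (message[j+1] guarded by IndexError) by a run-length scan: each maximal run of equal characters is walked once and a space-run of length L starting at pos emits pos..pos+L-2 via range(), with leading/trailing checks kept; the final early-return loop becomes any().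
import Mathlib
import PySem

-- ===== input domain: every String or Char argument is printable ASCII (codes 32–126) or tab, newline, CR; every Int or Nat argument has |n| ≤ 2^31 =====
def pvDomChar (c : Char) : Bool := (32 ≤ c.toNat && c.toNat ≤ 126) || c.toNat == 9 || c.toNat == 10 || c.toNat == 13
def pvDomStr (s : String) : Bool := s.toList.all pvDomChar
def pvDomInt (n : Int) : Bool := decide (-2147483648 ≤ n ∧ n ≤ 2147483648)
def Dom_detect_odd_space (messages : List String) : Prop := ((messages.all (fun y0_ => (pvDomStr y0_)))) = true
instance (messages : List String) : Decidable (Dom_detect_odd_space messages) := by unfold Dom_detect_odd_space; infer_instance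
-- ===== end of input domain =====

-- B replaces A's pairwise scan with try/except lookahead by a run-length scan over maximal
-- runs of equal characters (objective: alternative decomposition, same cost).

-- ===== PORT A =====
-- per-message body of A's outer loop (the list that ends up in problems[i])
def aMsg (m : List Char) : List Int :=
  if m = [] then []                                            -- 'if not message: continue'
  else
    let p0 : List Int := if PySem.List.pyGet? m 0 = some ' ' then [(0:Int)] else []
    let p1 :=
      (PySem.List.enumerate m 0).foldl (fun p jc =>
        match PySem.List.pyGet? m (jc.1 + 1) with               -- try: message[j+1]
        | some nxt => if jc.2 = ' ' ∧ nxt = ' ' then p ++ [jc.1] else p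
        | none => p) p0                                         -- except IndexError: pass
    if PySem.List.pyGet? m (-1) = some ' ' then p1 ++ [(m.length : Int) - 1] else p1

def detect_odd_space (messages : List String) : List (List Int) :=
  let problems := messages.foldl (fun acc message => acc ++ [aMsg message.toList]) []
  -- 'for message_problem in problems: if message_problem: return problems / return []'
  if problems.any (fun l => decide (l ≠ [])) then problems else []

-- ===== PORT B =====
-- run-length scan: while pos < n, find the end of the run, emit pos..end-2 for a space run
def bRuns : List Char → Int → List Int
  | [], _ => []
  | c :: rest, pos =>
    let t := (rest.takeWhile (fun x => x == c)).length          -- end = pos + t + 1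
    (if c = ' ' ∧ 1 ≤ t then (List.range t).map (fun k : Nat => pos + (k : Int)) else [])
      ++ bRuns (rest.drop t) (pos + (t : Int) + 1)
termination_by m _ => m.length
decreasing_by simp [List.length_drop]

def bMsg (m : List Char) : List Int :=
  if m = [] then []
  else
    (if m.head? = some ' ' then [(0:Int)] else [])
      ++ bRuns m 0
      ++ (if m.getLast? = some ' ' then [(m.length : Int) - 1] else [])

def detect_odd_space_alt (messages : List String) : List (List Int) :=
  let problems := messages.map (fun s => bMsg s.toList)
  if problems.any (fun l => decide (l ≠ [])) then problems else []

-- ===== PRECONDITION & SPEC =====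
def Spec_detect_odd_space (messages : List String) (out : List (List Int)) : Prop := out = detect_odd_space_alt messages
instance (messages : List String) (out : List (List Int)) : Decidable (Spec_detect_odd_space messages out) := by unfold Spec_detect_odd_space; infer_instance

-- ===== CLAIM (what is proved, stated in full; the proofs are below) =====
def Claim_equal_detect_odd_space : Prop := ∀ (messages : List String), Dom_detect_odd_space messages → Spec_detect_odd_space messages (detect_odd_space messages)

-- ===== LEMMAS AND PROOFS =====

-- A's inner loop, as a structural recursion emitting the index of each adjacent space pair
def pairs : List Char → Int → List Int
  | [], _ => []
  | [_], _ => []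
  | c :: d :: rest, pos => (if c = ' ' ∧ d = ' ' then [pos] else []) ++ pairs (d :: rest) (pos + 1)

lemma foldA (m pre : List Char) (p : List Int) :
    (PySem.List.enumerate m (pre.length : Int)).foldl (fun p jc =>
        match PySem.List.pyGet? (pre ++ m) (jc.1 + 1) with
        | some nxt => if jc.2 = ' ' ∧ nxt = ' ' then p ++ [jc.1] else p
        | none => p) p
      = p ++ pairs m (pre.length : Int) := by
  induction m generalizing pre p with
  | nil => simp [PySem.List.enumerate_nil, pairs]
  | cons c rest ih =>
    rw [PySem.List.enumerate_cons]
    simp only [List.foldl_cons]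
    have hget : PySem.List.pyGet? (pre ++ c :: rest) ((pre.length : Int) + 1) = rest[0]? := by
      have := PySem.List.pyGet?_append_right pre (c :: rest) 1
      simpa using this
    rw [hget]
    cases rest with
    | nil =>
      simp [PySem.List.enumerate_nil, pairs]
    | cons d r' =>
      have ih' := ih (pre := pre ++ [c])
        (p := if c = ' ' ∧ d = ' ' then p ++ [(pre.length : Int)] else p)
      have hl : (((pre ++ [c]).length : Nat) : Int) = (pre.length : Int) + 1 := by
        simp
      rw [hl] at ih'
      have happ : (pre ++ [c]) ++ (d :: r') = pre ++ (c :: d :: r') := by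
        simp
      rw [happ] at ih'
      simp only [List.getElem?_cons_zero]
      rw [ih']
      show _ = p ++ pairs (c :: d :: r') (pre.length : Int)
      rw [pairs]
      by_cases h : c = ' ' ∧ d = ' ' <;> simp [h]

lemma aMsg_core (m : List Char) (p : List Int) :
    (PySem.List.enumerate m 0).foldl (fun p jc =>
        match PySem.List.pyGet? m (jc.1 + 1) with
        | some nxt => if jc.2 = ' ' ∧ nxt = ' ' then p ++ [jc.1] else p
        | none => p) p
      = p ++ pairs m 0 := by
  have h := foldA m [] p
  simpa using h

lemma range_map_shift (t : Nat) (pos : Int) :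
    (List.range (t + 1)).map (fun k : Nat => pos + (k : Int))
      = pos :: (List.range t).map (fun k : Nat => (pos + 1) + (k : Int)) := by
  rw [List.range_succ_eq_map, List.map_cons, List.map_map]
  congr 1
  · simp
  · apply List.map_congr_left
    intro k _
    simp only [Function.comp_apply]
    push_cast
    ring

lemma bRuns_cons (c : Char) (rest : List Char) (pos : Int) :
    bRuns (c :: rest) pos
      = (if rest.head? = some c ∧ c = ' ' then [pos] else []) ++ bRuns rest (pos + 1) := by
  cases rest with
  | nil => simp [bRuns]
  | cons d r' =>
    by_cases hdc : d = c
    · subst hdc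
      rw [bRuns]
      have htw : ((d :: r').takeWhile (fun x => x == d)).length
          = (r'.takeWhile (fun x => x == d)).length + 1 := by
        simp [List.takeWhile]
      rw [htw]
      set t' := (r'.takeWhile (fun x => x == d)).length with ht'
      have hdrop : (d :: r').drop (t' + 1) = r'.drop t' := by simp
      rw [hdrop]
      conv_rhs => rw [bRuns]
      rw [← ht']
      have harg : pos + ((t' : Int) + 1) + 1 = pos + 1 + (t' : Int) + 1 := by ring
      by_cases hsp : d = ' '
      · subst hsp
        by_cases ht : 1 ≤ t'
        · simp only [ht, le_add_iff_nonneg_left, Nat.zero_le, if_pos, List.head?_cons,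
            and_self, range_map_shift]
          simp only [List.cons_append, List.cons.injEq, true_and]
          push_cast
          rw [harg]
          simp
        · have ht0 : t' = 0 := by omega
          simp [ht0]
      · simp [hsp]
        rw [harg]
    · rw [bRuns]
      have htw0 : ((d :: r').takeWhile (fun x => x == c)).length = 0 := by
        simp [hdc]
      rw [htw0]
      simp
      exact fun h => absurd h hdc

lemma pairs_eq_bRuns (m : List Char) (pos : Int) : pairs m pos = bRuns m pos := by
  induction m generalizing pos with
  | nil => simp [pairs, bRuns]
  | cons c rest ih =>
    cases rest with
    | nil => simp [pairs, bRuns]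
    | cons d r' =>
      rw [pairs, bRuns_cons, ih]
      congr 1
      by_cases hc : c = ' ' <;> by_cases hd : d = ' ' <;> simp [hc, hd]

lemma aMsg_eq_bMsg (m : List Char) : aMsg m = bMsg m := by
  unfold aMsg bMsg
  by_cases hm : m = []
  · simp [hm]
  · simp only [hm, if_false]
    rw [aMsg_core, pairs_eq_bRuns]
    rw [PySem.List.pyGet?_zero, PySem.List.pyGet?_neg_one]
    have hhd : m[0]? = m.head? := by cases m <;> simp
    rw [hhd]
    by_cases h1 : m.head? = some ' ' <;> by_cases h2 : m.getLast? = some ' ' <;>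
      simp [h1, h2]

-- ===== VERDICT (by name: the statement is the Claim_ definition above) =====
theorem detect_odd_space_spec : Claim_equal_detect_odd_space := by
  intro messages _
  unfold Spec_detect_odd_space detect_odd_space detect_odd_space_alt
  rw [PySem.List.foldl_append_singleton_eq_map]
  simp only [List.nil_append,
    show (fun message => aMsg message.toList) = (fun s : String => bMsg s.toList) from
      funext fun s => aMsg_eq_bMsg s.toList]
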